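-- pv_equiv track=rewrite | github.com/tokamak-network/syb-mvp-notebook | utils/utils.py | generate_alphabetical_names
-- ===== SOURCE A (Python) =====
-- from typing import List, Dict, Optional, Tuple
--
-- def generate_alphabetical_names(n: int) -> List[str]:
--     """
--     Generate alphabetical names in order: Alice, Bob, Charlie, David, etc.
--
--     Args:
--         n: Number of names to generate
--
--     Returns:
--         List of names in alphabetical order
--     """
--     # Common first names in alphabetical order
--     names = [
--         "Alice", "Bob", "Charlie", "David", "Eve", "Frank", "Grace", "Henry",
--         "Ivy", "Jack", "Kate", "Leo", "Mia", "Noah", "Olivia", "Paul",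
--         "Quinn", "Rachel", "Sam", "Tina", "Uma", "Victor", "Wendy", "Xavier",
--         "Yara", "Zoe",
--         # Second batch
--         "Aaron", "Bella", "Clara", "Dylan", "Eliza", "Finn", "Gina", "Hank",
--         "Isabel", "Joel", "Kira", "Liam", "Mona", "Nate", "Opal", "Perry",
--         "Quincy", "Rosa", "Seth", "Tara", "Uri", "Vera", "Will", "Xena",
--         "Yosef", "Zara",
--         # Third batch
--         "Ava", "Ben", "Cara", "Derek", "Elsa", "Felix", "Gia", "Harvey",
--         "Ingrid", "Jade", "Kyle", "Leah", "Mason", "Nina", "Omar", "Paula",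
--         "Queenie", "Rex", "Sara", "Trevor", "Ulric", "Violet", "Wade", "Ximena",
--         "Yvonne", "Zander",
--     ]
--
--     # If we need more than 26, extend with numbered variants
--     if n > len(names):
--         # Repeat pattern with numbers
--         extended = []
--         for i in range(n):
--             if i < len(names):
--                 extended.append(names[i])
--             else:
--                 # Continue with pattern: Alice2, Bob2, etc.
--                 base_idx = i % len(names)
--                 suffix = (i // len(names)) + 1
--                 extended.append(f"{names[base_idx]}{suffix}")
--         return extended[:n]
--
--     return names[:n]
-- ===== SOURCE B (Python) =====
-- from typing import List
--
--
-- def generate_alphabetical_names(n: int) -> List[str]: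
--     """Generate alphabetical names: Alice, Bob, ..., then Alice2, Bob2, ..."""
--     names = [
--         "Alice", "Bob", "Charlie", "David", "Eve", "Frank", "Grace", "Henry",
--         "Ivy", "Jack", "Kate", "Leo", "Mia", "Noah", "Olivia", "Paul",
--         "Quinn", "Rachel", "Sam", "Tina", "Uma", "Victor", "Wendy", "Xavier",
--         "Yara", "Zoe",
--         "Aaron", "Bella", "Clara", "Dylan", "Eliza", "Finn", "Gina", "Hank",
--         "Isabel", "Joel", "Kira", "Liam", "Mona", "Nate", "Opal", "Perry",
--         "Quincy", "Rosa", "Seth", "Tara", "Uri", "Vera", "Will", "Xena",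
--         "Yosef", "Zara",
--         "Ava", "Ben", "Cara", "Derek", "Elsa", "Felix", "Gia", "Harvey",
--         "Ingrid", "Jade", "Kyle", "Leah", "Mason", "Nina", "Omar", "Paula",
--         "Queenie", "Rex", "Sara", "Trevor", "Ulric", "Violet", "Wade", "Ximena",
--         "Yvonne", "Zander",
--     ]
--     if n <= len(names):
--         return names[:n]
--     # whole cycles needed, then chop to n: cycle 0 is the plain list,
--     # cycle c >= 1 appends the suffix c+1 to every name.
--     cycles = (n + len(names) - 1) // len(names)
--     out = []
--     for c in range(cycles):
--         if c == 0:
--             out.extend(names)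
--         else:
--             out.extend(f"{name}{c + 1}" for name in names)
--     return out[:n]
-- ===== Notes on version B (the rewrite author's own statement) =====
-- stated objective: alternative
-- what changed: Replaces A's per-index flat loop (range(n) with an i<len test and i%len / i//len arithmetic on every index) by a closed-form cycle count followed by per-cycle batch extension (whole name lists appended, suffixed per cycle) and a final truncation.
import Mathlib
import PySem

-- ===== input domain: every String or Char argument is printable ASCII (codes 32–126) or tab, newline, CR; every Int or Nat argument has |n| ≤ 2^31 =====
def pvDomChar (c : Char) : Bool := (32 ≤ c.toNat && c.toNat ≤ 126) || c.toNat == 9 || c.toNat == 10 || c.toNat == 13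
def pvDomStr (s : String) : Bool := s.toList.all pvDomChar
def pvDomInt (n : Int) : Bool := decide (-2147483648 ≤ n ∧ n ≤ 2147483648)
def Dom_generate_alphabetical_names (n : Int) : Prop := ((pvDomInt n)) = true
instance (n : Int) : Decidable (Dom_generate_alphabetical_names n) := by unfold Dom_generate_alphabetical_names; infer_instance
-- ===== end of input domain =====

-- B replaces A's flat per-index loop (i % len, i // len on every index) by a closed-form
-- cycle count with per-cycle batch appends; an alternative decomposition, same cost.

-- the shared constant list of 78 names (module-level data in both programs)
def pvNames : List String := [
  "Alice", "Bob", "Charlie", "David", "Eve", "Frank", "Grace", "Henry",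
  "Ivy", "Jack", "Kate", "Leo", "Mia", "Noah", "Olivia", "Paul",
  "Quinn", "Rachel", "Sam", "Tina", "Uma", "Victor", "Wendy", "Xavier",
  "Yara", "Zoe",
  "Aaron", "Bella", "Clara", "Dylan", "Eliza", "Finn", "Gina", "Hank",
  "Isabel", "Joel", "Kira", "Liam", "Mona", "Nate", "Opal", "Perry",
  "Quincy", "Rosa", "Seth", "Tara", "Uri", "Vera", "Will", "Xena",
  "Yosef", "Zara",
  "Ava", "Ben", "Cara", "Derek", "Elsa", "Felix", "Gia", "Harvey",
  "Ingrid", "Jade", "Kyle", "Leah", "Mason", "Nina", "Omar", "Paula",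
  "Queenie", "Rex", "Sara", "Trevor", "Ulric", "Violet", "Wade", "Ximena",
  "Yvonne", "Zander"]

-- ===== PORT A =====
def generate_alphabetical_names (n : Int) : List String :=
  if n > (pvNames.length : Int) then
    let extended := (PySem.List.pyRange 0 n 1).foldl (fun acc i =>
      if i < (pvNames.length : Int) then
        acc ++ [PySem.List.pyGetD pvNames i ""]
      else
        let base_idx := PySem.Int.mod i (pvNames.length : Int)
        let suffix := PySem.Int.floordiv i (pvNames.length : Int) + 1
        acc ++ [PySem.List.pyGetD pvNames base_idx "" ++ PySem.Int.toStr suffix]) []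
    PySem.List.slice extended none (some n)
  else
    PySem.List.slice pvNames none (some n)

-- ===== PORT B =====
def generate_alphabetical_names_alt (n : Int) : List String :=
  if n ≤ (pvNames.length : Int) then
    PySem.List.slice pvNames none (some n)
  else
    let cycles := PySem.Int.floordiv (n + (pvNames.length : Int) - 1) (pvNames.length : Int)
    let out := (PySem.List.pyRange 0 cycles 1).foldl (fun acc c =>
      if c = 0 then acc ++ pvNames
      else acc ++ pvNames.map (fun name => name ++ PySem.Int.toStr (c + 1))) []
    PySem.List.slice out none (some n)

-- ===== PRECONDITION & SPEC =====
def Spec_generate_alphabetical_names (n : Int) (out : List String) : Prop := out = generate_alphabetical_names_alt n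
instance (n : Int) (out : List String) : Decidable (Spec_generate_alphabetical_names n out) := by unfold Spec_generate_alphabetical_names; infer_instance

-- ===== CLAIM (what is proved, stated in full; the proofs are below) =====
def Claim_equal_generate_alphabetical_names : Prop := ∀ (n : Int), Dom_generate_alphabetical_names n → Spec_generate_alphabetical_names n (generate_alphabetical_names n)

-- ===== LEMMAS AND PROOFS =====

-- the per-index value A's loop appends at index i (0 ≤ i)
def pvEntry (i : Int) : String :=
  if i < (pvNames.length : Int) then
    PySem.List.pyGetD pvNames i ""
  else
    PySem.List.pyGetD pvNames (PySem.Int.mod i (pvNames.length : Int)) "" ++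
      PySem.Int.toStr (PySem.Int.floordiv i (pvNames.length : Int) + 1)

theorem pvNames_getD_range :
    (List.range 78).map (fun (j : Nat) => pvNames.getD j "") = pvNames := by decide

-- one cycle of B equals 78 consecutive entries of A's loop
theorem pvCycle_eq (C : Nat) :
    (if (C : Int) = 0 then pvNames
     else pvNames.map (fun name => name ++ PySem.Int.toStr ((C : Int) + 1)))
      = (List.range 78).map (fun (j : Nat) => pvEntry ((C * 78 + j : Nat) : Int)) := by
  rcases Nat.eq_zero_or_pos C with hC | hC
  · subst hC
    simp only [Nat.cast_zero, Nat.zero_mul, Nat.zero_add, if_pos]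
    have : ∀ j ∈ List.range 78, pvEntry ((j : Nat) : Int) = pvNames.getD j "" := by
      intro j hj
      rw [List.mem_range] at hj
      unfold pvEntry
      rw [if_pos (by exact_mod_cast hj)]
      simp [PySem.List.pyGetD_natCast]
    rw [List.map_congr_left this, pvNames_getD_range]
  · rw [if_neg (by exact_mod_cast Nat.pos_iff_ne_zero.mp hC)]
    have hmap : ∀ j ∈ List.range 78,
        pvEntry ((C * 78 + j : Nat) : Int) = pvNames.getD j "" ++ PySem.Int.toStr ((C : Int) + 1) := by
      intro j hj
      rw [List.mem_range] at hj
      unfold pvEntry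
      have hge : ¬ ((C * 78 + j : Nat) : Int) < (pvNames.length : Int) := by
        show ¬ ((C * 78 + j : Nat) : Int) < (78 : Int)
        push_cast
        omega
      rw [if_neg hge]
      have hmod : PySem.Int.mod ((C * 78 + j : Nat) : Int) (pvNames.length : Int) = (j : Int) := by
        show PySem.Int.mod ((C * 78 + j : Nat) : Int) (78 : Int) = (j : Int)
        rw [PySem.Int.mod_eq_emod_of_pos (by omega)]
        push_cast
        omega
      have hdiv : PySem.Int.floordiv ((C * 78 + j : Nat) : Int) (pvNames.length : Int) = (C : Int) := by
        show PySem.Int.floordiv ((C * 78 + j : Nat) : Int) (78 : Int) = (C : Int)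
        rw [PySem.Int.floordiv_eq_ediv_of_pos (by omega)]
        push_cast
        omega
      rw [hmod, hdiv]
      simp [PySem.List.pyGetD_natCast]
    rw [List.map_congr_left hmap]
    rw [show (fun name => name ++ PySem.Int.toStr ((C : Int) + 1))
          = (fun s => s ++ PySem.Int.toStr ((C : Int) + 1)) from rfl]
    rw [← pvNames_getD_range, List.map_map]
    rfl

-- B's concatenation of C cycles equals the first C*78 entries of A's loop
theorem pvCycles_eq (C : Nat) :
    ((List.range C).map (fun (k : Nat) => (k : Int))).flatMap
        (fun c => if c = 0 then pvNames
                  else pvNames.map (fun name => name ++ PySem.Int.toStr (c + 1)))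
      = (List.range (C * 78)).map (fun (j : Nat) => pvEntry (j : Int)) := by
  induction C with
  | zero => simp
  | succ C ih =>
    rw [List.range_succ, List.map_append, List.flatMap_append, ih]
    have : (C + 1) * 78 = C * 78 + 78 := by ring
    rw [this, List.range_add, List.map_append]
    congr 1
    simp only [List.map_cons, List.map_nil, List.flatMap_cons, List.flatMap_nil, List.append_nil]
    rw [pvCycle_eq C, List.map_map]
    rfl

-- ===== VERDICT (by name: the statement is the Claim_ definition above) =====
theorem generate_alphabetical_names_spec : Claim_equal_generate_alphabetical_names := by
  unfold Claim_equal_generate_alphabetical_names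
  intro n _
  unfold Spec_generate_alphabetical_names
  unfold generate_alphabetical_names generate_alphabetical_names_alt
  by_cases hle : n ≤ (pvNames.length : Int)
  · rw [if_neg (by omega), if_pos hle]
  · have hgt : (pvNames.length : Int) < n := by omega
    rw [if_pos hgt, if_neg hle]
    dsimp only
    -- both sides are slices to n; reduce each body
    have h78 : (pvNames.length : Int) = (78 : Int) := rfl
    set N : Nat := n.toNat with hN
    have hn : n = (N : Int) := by omega
    -- A's loop body appends exactly [pvEntry i]
    have hA : (PySem.List.pyRange 0 n 1).foldl (fun acc i =>
        if i < (pvNames.length : Int) then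
          acc ++ [PySem.List.pyGetD pvNames i ""]
        else
          acc ++ [PySem.List.pyGetD pvNames (PySem.Int.mod i (pvNames.length : Int)) "" ++
            PySem.Int.toStr (PySem.Int.floordiv i (pvNames.length : Int) + 1)]) ([] : List String)
        = (PySem.List.pyRange 0 n 1).map pvEntry := by
      have hfun : (fun (acc : List String) (i : Int) =>
          if i < (pvNames.length : Int) then
            acc ++ [PySem.List.pyGetD pvNames i ""]
          else
            acc ++ [PySem.List.pyGetD pvNames (PySem.Int.mod i (pvNames.length : Int)) "" ++
              PySem.Int.toStr (PySem.Int.floordiv i (pvNames.length : Int) + 1)])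
          = (fun acc i => acc ++ [pvEntry i]) := by
        funext acc i
        unfold pvEntry
        split <;> rfl
      rw [hfun, PySem.List.foldl_append_singleton_eq_map, List.nil_append]
    rw [hA]
    -- cycle count of B
    set C : Int := PySem.Int.floordiv (n + (pvNames.length : Int) - 1) (pvNames.length : Int) with hC
    have hCposdef : C = (n + 77) / 78 := by
      rw [hC, h78, PySem.Int.floordiv_eq_ediv_of_pos (by omega)]
      congr 1; omega
    set Cn : Nat := C.toNat with hCn
    have hCval : C = (Cn : Int) := by
      have : 0 ≤ C := by rw [hCposdef]; exact Int.ediv_nonneg (by omega) (by omega)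
      omega
    -- B's fold is the flatMap of cycles
    have hB : (PySem.List.pyRange 0 C 1).foldl (fun acc c =>
        if c = 0 then acc ++ pvNames
        else acc ++ pvNames.map (fun name => name ++ PySem.Int.toStr (c + 1))) ([] : List String)
        = ((List.range Cn).map (fun (k : Nat) => (k : Int))).flatMap
            (fun c => if c = 0 then pvNames
                      else pvNames.map (fun name => name ++ PySem.Int.toStr (c + 1))) := by
      have hfun : (fun (acc : List String) (c : Int) =>
          if c = 0 then acc ++ pvNames
          else acc ++ pvNames.map (fun name => name ++ PySem.Int.toStr (c + 1)))
          = (fun acc c => acc ++ (if c = 0 then pvNames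
              else pvNames.map (fun name => name ++ PySem.Int.toStr (c + 1)))) := by
        funext acc c; split <;> rfl
      rw [hfun, PySem.List.foldl_append_eq_flatMap, List.nil_append]
      congr 1
      rw [PySem.List.pyRange_one, hCval]
      simp
    rw [hB, pvCycles_eq Cn]
    -- both sides are now slices of maps of pvEntry over ranges
    rw [hn, PySem.List.slice_to_natCast, PySem.List.slice_to_natCast]
    have hrange : PySem.List.pyRange 0 ((N : Int)) 1
        = (List.range N).map (fun (k : Nat) => (k : Int)) := by
      rw [PySem.List.pyRange_one]
      simp
    rw [hrange, List.map_map]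
    -- N ≤ Cn * 78, so both takes give map pvEntry∘cast over range N
    have hNle : N ≤ Cn * 78 := by
      have h1 : n = (N : Int) := hn
      have h2 : C = (n + 77) / 78 := hCposdef
      have h3 : 78 * ((n + 77) / 78) + (n + 77) % 78 = n + 77 := Int.mul_ediv_add_emod _ _
      have h4 : 0 ≤ (n + 77) % 78 := Int.emod_nonneg _ (by omega)
      have h5 : (n + 77) % 78 < 78 := Int.emod_lt_of_pos _ (by omega)
      have h6 : C = (Cn : Int) := hCval
      have : (N : Int) ≤ (Cn : Int) * 78 := by omega
      exact_mod_cast this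
    rw [← List.map_take, ← List.map_take, List.take_range, List.take_range,
        Nat.min_eq_left hNle, Nat.min_eq_left (le_refl N)]
    rfl
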